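-- pv_equiv track=rewrite | github.com/Alomgir27/goinsights | backend/app/services/youtube.py | _get_audio_url
-- ===== SOURCE A (Python) =====
-- from typing import Optional
--
-- def _get_audio_url(info: dict) -> Optional[str]:
--     """Extract best audio URL from video info"""
--     formats = info.get("formats", [])
--     audio_formats = [f for f in formats if f.get("acodec") != "none" and f.get("vcodec") == "none"]
--     if audio_formats:
--         return audio_formats[-1].get("url")
--     # Fallback to best format with audio
--     for f in reversed(formats):
--         if f.get("acodec") != "none":
--             return f.get("url")
--     return None
-- ===== SOURCE B (Python) =====
-- from typing import Optional
--
-- def _get_audio_url(info: dict) -> Optional[str]: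
--     """Extract best audio URL from video info (single reverse pass)."""
--     fallback = None
--     have_fallback = False
--     for f in reversed(info.get("formats", [])):
--         if f.get("acodec") != "none":
--             if f.get("vcodec") == "none":
--                 return f.get("url")
--             if not have_fallback:
--                 have_fallback = True
--                 fallback = f
--     return fallback.get("url") if have_fallback else None
-- ===== Notes on version B (the rewrite author's own statement) =====
-- stated objective: alternative
-- what changed: Replaces the list comprehension over all formats plus a second fallback loop with a single reverse pass that returns at the first audio-only format and remembers the first with-audio format as fallback.
import Mathlib
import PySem

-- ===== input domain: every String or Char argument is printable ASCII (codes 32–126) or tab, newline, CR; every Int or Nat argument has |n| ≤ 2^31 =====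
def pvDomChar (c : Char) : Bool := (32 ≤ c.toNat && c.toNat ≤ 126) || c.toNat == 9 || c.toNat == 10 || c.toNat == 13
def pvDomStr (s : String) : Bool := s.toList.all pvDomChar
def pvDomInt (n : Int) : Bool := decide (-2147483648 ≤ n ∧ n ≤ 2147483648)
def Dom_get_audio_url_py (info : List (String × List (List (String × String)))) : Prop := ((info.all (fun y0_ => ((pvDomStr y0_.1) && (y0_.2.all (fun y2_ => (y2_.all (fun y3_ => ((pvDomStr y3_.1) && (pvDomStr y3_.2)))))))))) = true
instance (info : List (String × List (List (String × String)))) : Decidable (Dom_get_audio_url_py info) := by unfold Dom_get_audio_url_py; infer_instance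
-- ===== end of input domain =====

-- B replaces A's filter-then-fallback-loop by a single reverse pass with an early return
-- and a remembered fallback: same result by a different decomposition (one traversal, no intermediate list).


-- ===== PORT A =====
-- assoc-list lookup, first match (Python dict .get)
def pvGet? (d : List (String × String)) (k : String) : Option String :=
  (d.find? (fun kv => kv.1 == k)).map (fun kv => kv.2)

-- info.get("formats", []) : first-match lookup with default
def pvFormats (info : List (String × List (List (String × String)))) : List (List (String × String)) :=
  match info.find? (fun kv => kv.1 == "formats") with
  | some kv => kv.2
  | none => []

-- f.get("acodec") != "none"  (missing key counts as != "none")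
def pvHasAudio (f : List (String × String)) : Bool := pvGet? f "acodec" != some "none"
-- f.get("vcodec") == "none"
def pvNoVideo (f : List (String × String)) : Bool := pvGet? f "vcodec" == some "none"

def get_audio_url_py (info : List (String × List (List (String × String)))) : Option String :=
  let formats := pvFormats info
  let audio_formats := formats.filter (fun f => pvHasAudio f && pvNoVideo f)
  match audio_formats.getLast? with
  | some f => pvGet? f "url"
  | none =>
    match formats.reverse.find? pvHasAudio with
    | some f => pvGet? f "url"
    | none => none

-- ===== PORT B =====
-- single reverse pass: return the first audio-only format's url; remember the first
-- with-audio format seen as fallback, used when no audio-only format exists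
def pvGoB : List (List (String × String)) → Option (List (String × String)) → Option String
  | [], fb =>
    match fb with
    | some f => pvGet? f "url"
    | none => none
  | f :: rest, fb =>
    if pvHasAudio f then
      if pvNoVideo f then pvGet? f "url"
      else pvGoB rest (match fb with | some _ => fb | none => some f)
    else pvGoB rest fb

def get_audio_url_py_alt (info : List (String × List (List (String × String)))) : Option String :=
  pvGoB (pvFormats info).reverse none

-- ===== PRECONDITION & SPEC =====
def Spec_get_audio_url_py (info : List (String × List (List (String × String)))) (out : Option String) : Prop := out = get_audio_url_py_alt info
instance (info : List (String × List (List (String × String)))) (out : Option String) : Decidable (Spec_get_audio_url_py info out) := by unfold Spec_get_audio_url_py; infer_instance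

-- ===== CLAIM (what is proved, stated in full; the proofs are below) =====
def Claim_equal_get_audio_url_py : Prop := ∀ (info : List (String × List (List (String × String)))), Dom_get_audio_url_py info → Spec_get_audio_url_py info (get_audio_url_py info)

-- ===== LEMMAS AND PROOFS =====

theorem pvGoB_eq (l : List (List (String × String))) (fb : Option (List (String × String))) :
    pvGoB l fb =
      match l.find? (fun f => pvHasAudio f && pvNoVideo f) with
      | some f => pvGet? f "url"
      | none =>
        match (match fb with | some _ => fb | none => l.find? pvHasAudio) with
        | some f => pvGet? f "url"
        | none => none := by
  induction l generalizing fb with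
  | nil => cases fb <;> simp [pvGoB]
  | cons f rest ih =>
    by_cases ha : pvHasAudio f
    · by_cases hv : pvNoVideo f
      · simp [pvGoB, ha, hv, List.find?]
      · simp only [pvGoB, ha, if_true, hv, ih]
        simp only [List.find?, ha, hv, Bool.and_false]
        cases fb <;> simp
    · simp only [pvGoB, ha, ih]
      simp [List.find?, ha]

theorem head?_filter_eq_find? (p : α → Bool) (l : List α) :
    (l.filter p).head? = l.find? p := by
  induction l with
  | nil => rfl
  | cons a t ih =>
    by_cases h : p a <;> simp [List.filter, List.find?, h, ih]

theorem getLast?_filter_eq_find?_reverse (p : α → Bool) (l : List α) :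
    (l.filter p).getLast? = l.reverse.find? p := by
  rw [List.getLast?_eq_head?_reverse, ← List.filter_reverse, head?_filter_eq_find?]

-- ===== VERDICT (by name: the statement is the Claim_ definition above) =====
theorem get_audio_url_py_spec : Claim_equal_get_audio_url_py := by
  intro info _
  unfold Spec_get_audio_url_py get_audio_url_py get_audio_url_py_alt
  simp only [pvGoB_eq, getLast?_filter_eq_find?_reverse]
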